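-- pv_equiv track=rewrite | github.com/scauglog/brain_record_toolbox | signal_processing.py | step_spike_error_stat
-- ===== SOURCE A (Python) =====
-- def step_spike_error_stat(steps_list, spikes_time):
--     correct = 0
--     false = 0
--     missing = 0
--     for step in steps_list:
--         done = False
--         for time in spikes_time:
--             if step[0] < time < step[1]:
--                 correct += 1
--                 done = True
--                 break
--         if not done:
--             missing += 1
--     for time in spikes_time:
--         done = False
--         for step in steps_list:
--             if step[0] < time < step[1]:
--                 done = True
--                 break
--         if not done:
--             false += 1
--     return correct, false, missing
-- ===== SOURCE B (Python) =====
-- def _bisect_left(xs, x):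
--     lo, hi = 0, len(xs)
--     while lo < hi:
--         mid = (lo + hi) // 2
--         if xs[mid] < x:
--             lo = mid + 1
--         else:
--             hi = mid
--     return lo
--
--
-- def _bisect_right(xs, x):
--     lo, hi = 0, len(xs)
--     while lo < hi:
--         mid = (lo + hi) // 2
--         if x < xs[mid]:
--             hi = mid
--         else:
--             lo = mid + 1
--     return lo
--
--
-- def step_spike_error_stat(steps_list, spikes_time):
--     # Sort spikes once; a step (a, b) is hit iff the smallest spike > a is < b.
--     ts = sorted(spikes_time)
--     correct = 0
--     for a, b in steps_list:
--         j = _bisect_right(ts, a)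
--         if j < len(ts) and ts[j] < b:
--             correct += 1
--     missing = len(steps_list) - correct
--     # Sort steps by start; a spike t is covered iff among the steps whose
--     # start is < t (a prefix of the sorted order) some end exceeds t,
--     # i.e. the prefix-maximum of ends at that point is > t.
--     ss = sorted(steps_list, key=lambda s: s[0])
--     starts = [s[0] for s in ss]
--     pm = []
--     m = None
--     for s in ss:
--         m = s[1] if m is None else max(m, s[1])
--         pm.append(m)
--     false = 0
--     for t in ts:
--         k = _bisect_left(starts, t)
--         if k == 0 or pm[k - 1] <= t:
--             false += 1
--     return correct, false, missing
-- ===== Notes on version B (the rewrite author's own statement) =====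
-- stated objective: faster
-- what changed: Replaces the two nested O(n*m) scans by sorting: spikes are sorted so each step is checked with one binary search (smallest spike greater than the start), and steps are sorted by start with a prefix-maximum of ends so each spike is checked with one binary search.
import Mathlib
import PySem

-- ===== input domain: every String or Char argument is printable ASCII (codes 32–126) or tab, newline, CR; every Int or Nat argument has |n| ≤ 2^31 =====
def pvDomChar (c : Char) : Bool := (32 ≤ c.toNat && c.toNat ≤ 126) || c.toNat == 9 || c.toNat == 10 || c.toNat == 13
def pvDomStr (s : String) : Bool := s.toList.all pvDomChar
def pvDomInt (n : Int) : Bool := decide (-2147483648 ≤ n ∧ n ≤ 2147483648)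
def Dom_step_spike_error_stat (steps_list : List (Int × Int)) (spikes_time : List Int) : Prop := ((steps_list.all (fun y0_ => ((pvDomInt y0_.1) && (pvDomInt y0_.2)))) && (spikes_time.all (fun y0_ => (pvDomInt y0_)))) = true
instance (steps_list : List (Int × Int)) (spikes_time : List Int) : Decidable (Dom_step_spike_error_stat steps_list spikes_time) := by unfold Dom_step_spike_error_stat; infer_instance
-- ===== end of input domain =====

-- B sorts the spikes and the steps once and answers each per-step / per-spike
-- question with a binary search (plus a prefix-maximum of step ends), instead
-- of A's two nested scans; objective: faster (asymptotic).
-- ===== PORT A =====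
-- inner 'for time in spikes_time: … break' of the first loop (returns 'done')
def aFindSpike (step : Int × Int) : List Int → Bool
  | [] => false
  | t :: rest => if step.1 < t ∧ t < step.2 then true else aFindSpike step rest

-- inner 'for step in steps_list: … break' of the second loop (returns 'done')
def aFindStep (t : Int) : List (Int × Int) → Bool
  | [] => false
  | s :: rest => if s.1 < t ∧ t < s.2 then true else aFindStep t rest

def step_spike_error_stat (steps_list : List (Int × Int)) (spikes_time : List Int) : Int × Int × Int :=
  let cm : Int × Int := steps_list.foldl
    (fun cm step => if aFindSpike step spikes_time then (cm.1 + 1, cm.2) else (cm.1, cm.2 + 1))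
    (0, 0)
  let f : Int := spikes_time.foldl
    (fun f t => if aFindStep t steps_list then f else f + 1) 0
  (cm.1, f, cm.2)

-- ===== PORT B =====
-- _bisect_left/_bisect_right in Source B are the textbook lo/hi loops; they are
-- ported as PySem.List.bisectLeft / bisectRight, which are exactly those loops.
def step_spike_error_stat_alt (steps_list : List (Int × Int)) (spikes_time : List Int) : Int × Int × Int :=
  let ts := PySem.List.sorted spikes_time (fun t => t)
  let correct : Int := steps_list.foldl
    (fun acc s =>
      let j := PySem.List.bisectRight ts s.1
      match ts[j]? with            -- 'j < len(ts) and ts[j] < b'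
      | some t => if t < s.2 then acc + 1 else acc
      | none => acc) 0
  let missing : Int := (steps_list.length : Int) - correct
  let ss := PySem.List.sorted steps_list (fun s => s.1)
  let starts := ss.map (fun s => s.1)
  let pm : List Int := (ss.foldl
    (fun (st : List Int × Option Int) s =>
      let m := match st.2 with | none => s.2 | some m => max m s.2
      (st.1 ++ [m], some m)) ([], none)).1
  let f : Int := ts.foldl
    (fun acc t =>
      let k := PySem.List.bisectLeft starts t
      if k = 0 then acc + 1
      else match pm[k - 1]? with
           | some m => if m ≤ t then acc + 1 else acc
           | none => acc) 0
  (correct, f, missing)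

-- ===== PRECONDITION & SPEC =====
def Spec_step_spike_error_stat (steps_list : List (Int × Int)) (spikes_time : List Int) (out : Int × Int × Int) : Prop := out = step_spike_error_stat_alt steps_list spikes_time
instance (steps_list : List (Int × Int)) (spikes_time : List Int) (out : Int × Int × Int) : Decidable (Spec_step_spike_error_stat steps_list spikes_time out) := by unfold Spec_step_spike_error_stat; infer_instance

-- ===== CLAIM (what is proved, stated in full; the proofs are below) =====
def Claim_equal_step_spike_error_stat : Prop := ∀ (steps_list : List (Int × Int)) (spikes_time : List Int), Dom_step_spike_error_stat steps_list spikes_time → Spec_step_spike_error_stat steps_list spikes_time (step_spike_error_stat steps_list spikes_time)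

-- ===== LEMMAS AND PROOFS =====

-- the boolean conditions of the two programs
def pCond (s : Int × Int) (t : Int) : Bool := decide (s.1 < t ∧ t < s.2)

theorem aFindSpike_eq_any (s : Int × Int) (l : List Int) :
    aFindSpike s l = l.any (pCond s) := by
  induction l with
  | nil => rfl
  | cons t r ih => by_cases h : s.1 < t ∧ t < s.2 <;> simp [aFindSpike, pCond, List.any_cons, ih, h]

theorem aFindStep_eq_any (t : Int) (l : List (Int × Int)) :
    aFindStep t l = l.any (fun s => pCond s t) := by
  induction l with
  | nil => rfl
  | cons s r ih => by_cases h : s.1 < t ∧ t < s.2 <;> simp [aFindStep, pCond, List.any_cons, ih, h]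

theorem foldA_eq (spikes : List Int) (l : List (Int × Int)) (c m : Int) :
    (l.foldl (fun cm step => if aFindSpike step spikes then (cm.1 + 1, cm.2) else (cm.1, cm.2 + 1)) (c, m))
      = (c + l.countP (fun s => aFindSpike s spikes), m + l.countP (fun s => !aFindSpike s spikes)) := by
  induction l generalizing c m with
  | nil => simp
  | cons s r ih =>
    simp only [List.foldl_cons, List.countP_cons]
    by_cases h : aFindSpike s spikes <;> simp [h, ih] <;> omega

theorem foldNot_eq (p : Int → Bool) (l : List Int) (a : Int) :
    l.foldl (fun f t => if p t then f else f + 1) a = a + l.countP (fun t => !p t) := by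
  induction l generalizing a with
  | nil => simp
  | cons t r ih =>
    simp only [List.foldl_cons, List.countP_cons]
    by_cases h : p t <;> simp [h, ih] <;> ring

-- the per-step check B performs on the sorted spike list
def bCheck (ts : List Int) (s : Int × Int) : Bool :=
  match ts[PySem.List.bisectRight ts s.1]? with
  | some t => decide (t < s.2)
  | none => false

theorem foldB_correct_eq (ts : List Int) (l : List (Int × Int)) (a : Int) :
    (l.foldl (fun acc s =>
        match ts[PySem.List.bisectRight ts s.1]? with
        | some t => if t < s.2 then acc + 1 else acc
        | none => acc) a)
      = a + l.countP (bCheck ts) := by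
  induction l generalizing a with
  | nil => simp
  | cons s r ih =>
    simp only [List.foldl_cons, List.countP_cons]
    cases h : ts[PySem.List.bisectRight ts s.1]? with
    | none => simp [bCheck, h, ih]
    | some t => by_cases ht : t < s.2 <;> simp [bCheck, h, ht, ih] <;> ring

theorem bCheck_eq_any (ts : List Int) (hs : ts.Pairwise (· ≤ ·)) (s : Int × Int) :
    bCheck ts s = ts.any (pCond s) := by
  obtain ⟨hle, hlt, hgt⟩ := PySem.List.bisectRight_spec ts s.1 hs
  set j := PySem.List.bisectRight ts s.1 with hj
  by_cases hjl : j < ts.length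
  · have hget : ts[j]? = some ts[j] := List.getElem?_eq_getElem hjl
    by_cases hb : ts[j] < s.2
    · have hany : ts.any (pCond s) = true := by
        refine List.any_eq_true.mpr ⟨ts[j], List.getElem_mem hjl, ?_⟩
        simp [pCond, hb, hgt j hjl (le_refl j)]
      unfold bCheck
      rw [← hj, hget, hany]
      simp [hb]
    · have hany : ts.any (pCond s) = false := by
        rw [List.any_eq_false]
        intro t ht
        obtain ⟨i, hi, rfl⟩ := List.mem_iff_getElem.mp ht
        simp only [pCond, decide_eq_true_eq, not_and]
        intro h1 h2
        rcases lt_or_ge i j with hij | hij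
        · exact absurd h1 (not_lt.mpr (hlt i hi hij))
        · rcases eq_or_lt_of_le hij with rfl | hij'
          · exact hb h2
          · exact hb (lt_of_le_of_lt (List.pairwise_iff_getElem.mp hs j i hjl hi hij') h2)
      unfold bCheck
      rw [← hj, hget, hany]
      simp [hb]
  · have hjlen : j = ts.length := le_antisymm hle (not_lt.mp hjl)
    have hget : ts[j]? = none := List.getElem?_eq_none (by omega)
    have hany : ts.any (pCond s) = false := by
      rw [List.any_eq_false]
      intro t ht
      obtain ⟨i, hi, rfl⟩ := List.mem_iff_getElem.mp ht
      simp only [pCond, decide_eq_true_eq, not_and]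
      intro h1 _
      exact absurd h1 (not_lt.mpr (hlt i hi (by omega)))
    unfold bCheck
    rw [← hj, hget, hany]

-- prefix-maximum list: recursion equivalent of B's pm-building loop
def goPm : List (Int × Int) → Option Int → List Int
  | [], _ => []
  | s :: r, m =>
      let m' := match m with | none => s.2 | some m => max m s.2
      m' :: goPm r (some m')

theorem pm_foldl_eq (l : List (Int × Int)) (acc : List Int) (m : Option Int) :
    (l.foldl (fun (st : List Int × Option Int) s =>
        let m := match st.2 with | none => s.2 | some m => max m s.2
        (st.1 ++ [m], some m)) (acc, m)).1 = acc ++ goPm l m := by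
  induction l generalizing acc m with
  | nil => simp [goPm]
  | cons s r ih => simp [goPm, ih, List.append_assoc]

-- optional max-accumulator fold over the ends of a prefix
def optFold (m : Option Int) (xs : List Int) : Option Int :=
  xs.foldl (fun o x => some (match o with | none => x | some m => max m x)) m

theorem goPm_getElem? (l : List (Int × Int)) (m : Option Int) (i : Nat) (hi : i < l.length) :
    (goPm l m)[i]? = optFold m ((l.take (i + 1)).map (·.2)) := by
  induction l generalizing m i with
  | nil => simp at hi
  | cons s r ih =>
    cases i with
    | zero => cases m <;> simp [goPm, optFold]
    | succ i =>
      have hi' : i < r.length := by simpa using hi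
      cases m <;> simp [goPm, optFold, ih _ i hi']

theorem optFold_some (m : Int) (xs : List Int) :
    optFold (some m) xs = some (xs.foldl max m) := by
  induction xs generalizing m with
  | nil => rfl
  | cons x r ih => simp [optFold, List.foldl_cons] at ih ⊢; exact ih (max m x)

theorem lt_foldl_max (xs : List Int) (m t : Int) :
    t < xs.foldl max m ↔ t < m ∨ ∃ x ∈ xs, t < x := by
  induction xs generalizing m with
  | nil => simp
  | cons x r ih =>
    simp only [List.foldl_cons, ih, lt_max_iff, List.mem_cons]
    constructor
    · rintro ((h | h) | ⟨y, hy, hty⟩)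
      · exact Or.inl h
      · exact Or.inr ⟨x, Or.inl rfl, h⟩
      · exact Or.inr ⟨y, Or.inr hy, hty⟩
    · rintro (h | ⟨y, (rfl | hy), hty⟩)
      · exact Or.inl (Or.inl h)
      · exact Or.inl (Or.inr hty)
      · exact Or.inr ⟨y, hy, hty⟩

-- the per-spike check B performs, shown equal to the negated linear scan
def fCheck (starts pm : List Int) (t : Int) : Bool :=
  let k := PySem.List.bisectLeft starts t
  if k = 0 then true
  else match pm[k - 1]? with
       | some m => decide (m ≤ t)
       | none => false

theorem foldB_false_eq (starts pm : List Int) (l : List Int) (a : Int) :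
    (l.foldl (fun acc t =>
        let k := PySem.List.bisectLeft starts t
        if k = 0 then acc + 1
        else match pm[k - 1]? with
             | some m => if m ≤ t then acc + 1 else acc
             | none => acc) a)
      = a + l.countP (fCheck starts pm) := by
  induction l generalizing a with
  | nil => simp
  | cons t r ih =>
    simp only [List.foldl_cons, List.countP_cons]
    by_cases hk : PySem.List.bisectLeft starts t = 0
    · simp [fCheck, hk, ih]; ring
    · cases h : pm[PySem.List.bisectLeft starts t - 1]? with
      | none => simp [fCheck, hk, h, ih]
      | some m => by_cases hm : m ≤ t <;> simp [fCheck, hk, h, hm, ih] <;> ring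

theorem fCheck_eq_not_any (ss : List (Int × Int))
    (hss : ss.Pairwise (fun a b => a.1 ≤ b.1)) (t : Int) :
    fCheck (ss.map (·.1)) (goPm ss none) t = !ss.any (fun s => pCond s t) := by
  have hstarts : (ss.map (·.1)).Pairwise (· ≤ ·) := List.pairwise_map.mpr hss
  obtain ⟨hle, hlt, hgt⟩ := PySem.List.bisectLeft_spec (ss.map (·.1)) t hstarts
  set k := PySem.List.bisectLeft (ss.map (·.1)) t with hkdef
  have hlen : (ss.map (·.1)).length = ss.length := List.length_map ..
  have hany : ss.any (fun s => pCond s t) = true ↔ ∃ i, ∃ h : i < ss.length, i < k ∧ t < ss[i].2 := by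
    rw [List.any_eq_true]
    constructor
    · rintro ⟨s, hs, hp⟩
      obtain ⟨i, hi, rfl⟩ := List.mem_iff_getElem.mp hs
      simp only [pCond, decide_eq_true_eq] at hp
      have hik : i < k := by
        by_contra hik
        have := hgt i (by omega) (by omega)
        simp only [List.getElem_map] at this
        omega
      exact ⟨i, hi, hik, hp.2⟩
    · rintro ⟨i, hi, hik, ht⟩
      refine ⟨ss[i], List.getElem_mem hi, ?_⟩
      have := hlt i (by omega) hik
      simp only [List.getElem_map] at this
      simp [pCond, this, ht]
  by_cases hk : k = 0
  · have : ss.any (fun s => pCond s t) = false := by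
      rw [List.any_eq_false]
      intro s hs hp
      obtain ⟨i, hi, hik, _⟩ := hany.mp (List.any_eq_true.mpr ⟨s, hs, hp⟩)
      omega
    simp [fCheck, ← hkdef, hk, this]
  · have hk1 : 1 ≤ k := Nat.one_le_iff_ne_zero.mpr hk
    have hklen : k ≤ ss.length := by omega
    have hk1len : k - 1 < ss.length := by omega
    have htake : (ss.take (k - 1 + 1)).map (·.2) = (ss.take k).map (·.2) := by
      congr 1; congr 1; omega
    have hne : (ss.take k) ≠ [] := by
      intro h
      have := congrArg List.length h
      simp [List.length_take, min_eq_left hklen] at this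
      omega
    obtain ⟨y, ys, hys⟩ := List.exists_cons_of_ne_nil hne
    have hpm : (goPm ss none)[k - 1]? = some ((ys.map (·.2)).foldl max y.2) := by
      rw [goPm_getElem? ss none (k - 1) hk1len, htake, hys]
      simp [optFold, List.foldl_cons]
      rw [show (List.foldl (fun o x => some (match o with | none => x | some m => max m x)) (some y.2) (List.map (·.2) ys)) = optFold (some y.2) (ys.map (·.2)) from rfl, optFold_some]
    have hmem : ∀ x : Int, (x ∈ (ss.take k).map (·.2) ∧ t < x) ↔ ∃ i, ∃ h : i < ss.length, i < k ∧ t < ss[i].2 ∧ ss[i].2 = x := by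
      intro x
      constructor
      · rintro ⟨hx, htx⟩
        obtain ⟨s, hs, rfl⟩ := List.mem_map.mp hx
        obtain ⟨i, hi, rfl⟩ := List.mem_iff_getElem.mp hs
        have hilen : i < ss.length := by
          have : i < (ss.take k).length := hi
          simp [List.length_take] at this
          omega
        refine ⟨i, hilen, ?_, ?_, ?_⟩
        · have : i < (ss.take k).length := hi
          simp [List.length_take] at this
          omega
        · simpa [List.getElem_take] using htx
        · simp [List.getElem_take]
      · rintro ⟨i, hi, hik, ht, rfl⟩
        have hitake : i < (ss.take k).length := by simp [List.length_take]; omega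
        refine ⟨List.mem_map.mpr ⟨(ss.take k)[i], List.getElem_mem hitake, ?_⟩, ?_⟩
        · simp [List.getElem_take]
        · simpa [List.getElem_take] using ht
    have hmax : t < (ys.map (·.2)).foldl max y.2 ↔ ∃ i, ∃ h : i < ss.length, i < k ∧ t < ss[i].2 := by
      rw [lt_foldl_max]
      constructor
      · rintro (h | ⟨x, hx, htx⟩)
        · obtain ⟨i, hi, hik, ht, _⟩ := (hmem y.2).mp ⟨by rw [hys]; simp, h⟩
          exact ⟨i, hi, hik, ht⟩
        · obtain ⟨i, hi, hik, ht, _⟩ := (hmem x).mp ⟨by rw [hys]; simp [hx], htx⟩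
          exact ⟨i, hi, hik, ht⟩
      · rintro ⟨i, hi, hik, ht⟩
        have := (hmem ss[i].2).mpr ⟨i, hi, hik, ht, rfl⟩
        obtain ⟨hx, htx⟩ := this
        rw [hys] at hx
        simp only [List.map_cons, List.mem_cons] at hx
        rcases hx with hx | hx
        · exact Or.inl (hx ▸ htx)
        · exact Or.inr ⟨_, hx, htx⟩
    by_cases hcond : t < (ys.map (·.2)).foldl max y.2
    · have : ss.any (fun s => pCond s t) = true := hany.mpr (hmax.mp hcond)
      simp [fCheck, ← hkdef, hk, hpm, this, not_le.mpr hcond]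
    · have : ss.any (fun s => pCond s t) = false := by
        by_contra h
        have h' : ss.any (fun s => pCond s t) = true := by
          cases hb : ss.any (fun s => pCond s t) <;> simp_all
        exact hcond (hmax.mpr (hany.mp h'))
      simp [fCheck, ← hkdef, hk, hpm, this, not_lt.mp hcond]

-- ===== VERDICT (by name: the statement is the Claim_ definition above) =====
theorem step_spike_error_stat_spec : Claim_equal_step_spike_error_stat := by
  intro steps spikes _
  unfold Spec_step_spike_error_stat step_spike_error_stat step_spike_error_stat_alt
  simp only []
  have hts : (PySem.List.sorted spikes (fun t => t)).Pairwise (· ≤ ·) := by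
    simpa using PySem.List.sorted_pairwise spikes (fun t => t)
  have hssp : (PySem.List.sorted steps (fun s => s.1)).Pairwise (fun a b => a.1 ≤ b.1) :=
    PySem.List.sorted_pairwise steps (fun s => s.1)
  have hperm_ts : (PySem.List.sorted spikes (fun t => t)).Perm spikes :=
    PySem.List.sorted_perm spikes (fun t => t) false
  have hperm_ss : (PySem.List.sorted steps (fun s => s.1)).Perm steps :=
    PySem.List.sorted_perm steps (fun s => s.1) false
  set ts := PySem.List.sorted spikes (fun t => t)
  set ss := PySem.List.sorted steps (fun s => s.1)
  rw [foldA_eq, foldNot_eq, foldB_correct_eq, pm_foldl_eq, foldB_false_eq]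
  have hcount1 : steps.countP (bCheck ts) = steps.countP (fun s => aFindSpike s spikes) := by
    apply List.countP_congr
    intro s _
    rw [bCheck_eq_any ts hts s, aFindSpike_eq_any, hperm_ts.any_eq]
  have hcount2 : ts.countP (fCheck (ss.map (·.1)) ([] ++ goPm ss none))
      = spikes.countP (fun t => !aFindStep t steps) := by
    rw [← hperm_ts.countP_eq]
    apply List.countP_congr
    intro t _
    simp only [List.nil_append]
    rw [fCheck_eq_not_any ss hssp t, aFindStep_eq_any, hperm_ss.any_eq]
  have hlen : steps.length = steps.countP (fun s => aFindSpike s spikes)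
      + steps.countP (fun s => !aFindSpike s spikes) := by
    simpa [decide_not] using
      List.length_eq_countP_add_countP (fun s => aFindSpike s spikes) (l := steps)
  rw [hcount1, hcount2]
  refine Prod.ext rfl (Prod.ext rfl ?_)
  simp only [zero_add]
  omega
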